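-- pv_equiv track=rewrite | github.com/oigomezz/Retos | Hackerearth/Codemonk/Level-15/Palindromes-in-a-table/solution.py | solve
-- ===== SOURCE A (Python) =====
-- def solve(n, table):
--     mod = 1000000007
--     sol = [[[0] * 501 for _ in range(501)] for _ in range(2)]
--
--     for i in range(n):
--         sol[0][i][i] = 1
--
--     for k in range(1, n):
--         old = sol[1 - (k & 1)]
--         dp = sol[k & 1]
--         for i in range(n - k):
--             for j in range(n - k):
--                 if table[n - k - i - 1][i] == table[n - j - 1][j + k]:
--                     dp[i][j] = ((old[i][j] + old[i + 1][j]) % mod +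
--                                 (old[i][j + 1] + old[i + 1][j + 1]) % mod) % mod
--                 else:
--                     dp[i][j] = 0
--
--     return sol[1 - (n & 1)][0][0]
-- ===== SOURCE B (Python) =====
-- def solve(n, table):
--     mod = 1000000007
--     cache = {}
--
--     def rec(i, j, k):
--         if k == 0:
--             return 1 if i == j else 0
--         key = (i, j, k)
--         if key in cache:
--             return cache[key]
--         if table[n - k - i - 1][i] == table[n - j - 1][j + k]:
--             val = (rec(i, j, k - 1) + rec(i + 1, j, k - 1)
--                    + rec(i, j + 1, k - 1) + rec(i + 1, j + 1, k - 1)) % mod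
--         else:
--             val = 0
--         cache[key] = val
--         return val
--
--     if n <= 0:
--         return 0
--     return rec(0, 0, n - 1)
-- ===== Notes on version B (the rewrite author's own statement) =====
-- stated objective: alternative
-- what changed: Replaces A's bottom-up DP over preallocated 501x501 rolling arrays with a top-down memoized recursion rec(i,j,k) over the same recurrence, caching each state in a dict and folding the four subresults with a single modulo.
import Mathlib
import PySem

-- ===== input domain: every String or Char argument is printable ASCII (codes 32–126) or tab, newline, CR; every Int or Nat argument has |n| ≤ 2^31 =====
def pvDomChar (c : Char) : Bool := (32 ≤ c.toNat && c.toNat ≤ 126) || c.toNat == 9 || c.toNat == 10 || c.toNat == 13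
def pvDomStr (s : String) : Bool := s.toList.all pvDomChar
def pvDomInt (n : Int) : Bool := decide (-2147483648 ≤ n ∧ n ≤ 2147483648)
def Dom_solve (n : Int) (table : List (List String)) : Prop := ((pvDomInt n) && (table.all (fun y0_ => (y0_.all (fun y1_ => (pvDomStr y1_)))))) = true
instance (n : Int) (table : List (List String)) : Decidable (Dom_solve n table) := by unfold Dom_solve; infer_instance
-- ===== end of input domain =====

-- B replaces A's bottom-up rolling-array DP by a top-down memoized recursion over the same
-- recurrence (objective: alternative decomposition; not claimed faster).

-- ===== PORT A =====
-- table[r][c]; default "" is only reached where Python raises IndexError (outside Pre_solve)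
def tget (table : List (List String)) (r c : Int) : String :=
  PySem.List.pyGetD (PySem.List.pyGetD table r []) c ""

-- pointwise write into a 2-D layer modelled as a total function (dp[a][b] = v)
def updA (f : Int → Int → Int) (a b v : Int) : Int → Int → Int :=
  fun x y => if x = a ∧ y = b then v else f x y

def solve (n : Int) (table : List (List String)) : Int :=
  let m : Int := 1000000007
  -- sol = [[[0]*501 for _ in range(501)] for _ in range(2)]: two all-zero layers
  let z : Int → Int → Int := fun _ _ => 0
  -- for i in range(n): sol[0][i][i] = 1
  let s0 := (PySem.List.pyRange 0 n 1).foldl (fun f i => updA f i i 1) z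
  -- for k in range(1, n): …
  let st := (PySem.List.pyRange 1 n 1).foldl
    (fun (st : (Int → Int → Int) × (Int → Int → Int)) k =>
      let old := if PySem.Int.band k 1 = 1 then st.1 else st.2   -- sol[1 - (k & 1)]
      let dp0 := if PySem.Int.band k 1 = 1 then st.2 else st.1   -- sol[k & 1]
      let dp := (PySem.List.pyRange 0 (n - k) 1).foldl (fun dp i =>
        (PySem.List.pyRange 0 (n - k) 1).foldl (fun dp j =>
          if tget table (n - k - i - 1) i = tget table (n - j - 1) (j + k) then
            updA dp i j (PySem.Int.mod
              (PySem.Int.mod (old i j + old (i + 1) j) m +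
               PySem.Int.mod (old i (j + 1) + old (i + 1) (j + 1)) m) m)
          else
            updA dp i j 0) dp) dp0
      if PySem.Int.band k 1 = 1 then (st.1, dp) else (dp, st.2)) (s0, z)
  -- return sol[1 - (n & 1)][0][0]
  (if PySem.Int.band n 1 = 1 then st.1 else st.2) 0 0

-- ===== PORT B =====
-- rec(i, j, k) with cache threaded through (k carried as the Nat it always is in B)
def recB (n : Int) (table : List (List String)) (m : Int) :
    Nat → Int → Int → PySem.Dict (Int × Int × Int) Int →
      Int × PySem.Dict (Int × Int × Int) Int
  | 0, i, j, cache => (if i = j then 1 else 0, cache)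
  | (k+1), i, j, cache =>
    let kk : Int := (k : Int) + 1
    match cache.get? (i, j, kk) with
    | some v => (v, cache)
    | none =>
      let r :=
        if tget table (n - kk - i - 1) i = tget table (n - j - 1) (j + kk) then
          let r1 := recB n table m k i j cache
          let r2 := recB n table m k (i + 1) j r1.2
          let r3 := recB n table m k i (j + 1) r2.2
          let r4 := recB n table m k (i + 1) (j + 1) r3.2
          (PySem.Int.mod (r1.1 + r2.1 + r3.1 + r4.1) m, r4.2)
        else (0, cache)
      (r.1, r.2.insert (i, j, kk) r.1)

def solve_alt (n : Int) (table : List (List String)) : Int :=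
  let m : Int := 1000000007
  if n ≤ 0 then 0
  else (recB n table m (n - 1).toNat 0 0 PySem.Dict.empty).1

-- ===== PRECONDITION & SPEC =====
-- Exactly where the Python A returns: n ≤ 501 (A's buffers are preallocated 501×501; for
-- n > 501 the init loop raises IndexError), and for n ≥ 2 every table cell A reads exists:
-- n rows, row 0 of length ≥ n-1 and rows 1..n-1 of length ≥ n (A never reads past those).
def Pre_solve (n : Int) (table : List (List String)) : Prop :=
  n ≤ 501 ∧ (2 ≤ n → n ≤ (table.length : Int) ∧
    ∀ r : Nat, r < n.toNat →
      (if r = 0 then n - 1 else n) ≤ (((table.getD r []).length : Int)))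
instance (n : Int) (table : List (List String)) : Decidable (Pre_solve n table) := by
  unfold Pre_solve; infer_instance

def pvWitness_solve : Int × List (List String) := (2, [["a", "b"], ["c", "a"]])

def Spec_solve (n : Int) (table : List (List String)) (out : Int) : Prop := out = solve_alt n table
instance (n : Int) (table : List (List String)) (out : Int) : Decidable (Spec_solve n table out) := by unfold Spec_solve; infer_instance

-- ===== CLAIM (what is proved, stated in full; the proofs are below) =====
def Claim_equal_solve : Prop := ∀ (n : Int) (table : List (List String)), Dom_solve n table → Pre_solve n table → Spec_solve n table (solve n table)

-- ===== LEMMAS AND PROOFS =====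

-- the common value both DPs compute: layer k of the palindromic-path count
def W (n : Int) (table : List (List String)) : Nat → Int → Int → Int
  | 0, i, j => if i = j then 1 else 0
  | (k+1), i, j =>
    let kk : Int := (k : Int) + 1
    if tget table (n - kk - i - 1) i = tget table (n - j - 1) (j + kk) then
      PySem.Int.mod (W n table k i j + W n table k (i + 1) j +
        W n table k i (j + 1) + W n table k (i + 1) (j + 1)) 1000000007
    else 0


-- ===== B side =====
def InvB (n : Int) (table : List (List String))
    (cache : PySem.Dict (Int × Int × Int) Int) : Prop :=
  ∀ i j kk v, cache.get? (i, j, kk) = some v → v = W n table kk.toNat i j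

lemma recB_correct (n : Int) (table : List (List String)) :
    ∀ (k : Nat) (i j : Int) (cache : PySem.Dict (Int × Int × Int) Int), InvB n table cache →
      (recB n table 1000000007 k i j cache).1 = W n table k i j ∧
      InvB n table (recB n table 1000000007 k i j cache).2 := by
  intro k
  induction k with
  | zero =>
    intro i j cache h
    exact ⟨rfl, h⟩
  | succ k ih =>
    intro i j cache h
    have htn : (((k : Int) + 1)).toNat = k + 1 := by omega
    rw [recB]
    cases hc : cache.get? (i, j, (k : Int) + 1) with
    | some v =>
      refine ⟨?_, h⟩
      have := h i j ((k : Int) + 1) v hc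
      simpa [htn] using this
    | none =>
      simp only []
      by_cases hcond :
          tget table (n - ((k : Int) + 1) - i - 1) i = tget table (n - j - 1) (j + ((k : Int) + 1))
      · obtain ⟨e1, h1⟩ := ih i j cache h
        obtain ⟨e2, h2⟩ := ih (i + 1) j _ h1
        obtain ⟨e3, h3⟩ := ih i (j + 1) _ h2
        obtain ⟨e4, h4⟩ := ih (i + 1) (j + 1) _ h3
        simp only [hcond, if_pos, e1, e2, e3, e4]
        have hw : W n table (k + 1) i j =
            PySem.Int.mod (W n table k i j + W n table k (i + 1) j +
              W n table k i (j + 1) + W n table k (i + 1) (j + 1)) 1000000007 := by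
          rw [W]; simp [hcond]
        refine ⟨hw.symm, ?_⟩
        intro i' j' kk' v' hget
        rw [PySem.Dict.get?_insert] at hget
        by_cases he : (i', j', kk') = (i, j, (k : Int) + 1)
        · rw [if_pos he] at hget
          obtain ⟨rfl, rfl, rfl⟩ : i' = i ∧ j' = j ∧ kk' = (k : Int) + 1 := by
            exact ⟨congrArg Prod.fst he, congrArg (Prod.fst ∘ Prod.snd) he,
              congrArg (Prod.snd ∘ Prod.snd) he⟩
          cases hget; rw [htn, hw]
        · rw [if_neg he] at hget
          exact h4 _ _ _ _ hget
      · simp only [hcond, ite_false]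
        have hw : W n table (k + 1) i j = 0 := by rw [W]; simp [hcond]
        refine ⟨hw.symm, ?_⟩
        intro i' j' kk' v' hget
        rw [PySem.Dict.get?_insert] at hget
        by_cases he : (i', j', kk') = (i, j, (k : Int) + 1)
        · rw [if_pos he] at hget
          obtain ⟨rfl, rfl, rfl⟩ : i' = i ∧ j' = j ∧ kk' = (k : Int) + 1 := by
            exact ⟨congrArg Prod.fst he, congrArg (Prod.fst ∘ Prod.snd) he,
              congrArg (Prod.snd ∘ Prod.snd) he⟩
          cases hget; rw [htn, hw]
        · rw [if_neg he] at hget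
          exact h _ _ _ _ hget

lemma solve_alt_eq_W (n : Int) (table : List (List String)) (hn : 0 < n) :
    solve_alt n table = W n table (n - 1).toNat 0 0 := by
  have hinv : InvB n table PySem.Dict.empty := by
    intro i j kk v hv; rw [PySem.Dict.get?_empty] at hv; cases hv
  have := (recB_correct n table (n - 1).toNat 0 0 PySem.Dict.empty hinv).1
  simp only [solve_alt]
  rw [if_neg (by omega)]
  exact this

-- ===== A side =====
lemma foldl_diag (xs : List Int) :
    ∀ (z : Int → Int → Int) (x y : Int),
      (xs.foldl (fun f i => updA f i i 1) z) x y = if x = y ∧ x ∈ xs then 1 else z x y := by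
  induction xs with
  | nil => intro z x y; simp
  | cons a xs ih =>
    intro z x y
    simp only [List.foldl_cons]
    rw [ih]
    simp only [updA, List.mem_cons]
    by_cases hxy : x = y
    · subst hxy
      split_ifs <;> tauto
    · rw [if_neg (by tauto), if_neg (by rintro ⟨h1, h2⟩; exact hxy (h1.trans h2.symm)),
        if_neg (by tauto)]

lemma foldl_upd_row (v : Int → Int) (i : Int) (xs : List Int) :
    ∀ (dp : Int → Int → Int) (x y : Int),
      (xs.foldl (fun d j => updA d i j (v j)) dp) x y
        = if x = i ∧ y ∈ xs then v y else dp x y := by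
  induction xs with
  | nil => intro dp x y; simp
  | cons a xs ih =>
    intro dp x y
    simp only [List.foldl_cons]
    rw [ih]
    simp only [updA, List.mem_cons]
    split_ifs <;> first | rfl | tauto

lemma foldl_upd_grid (v : Int → Int → Int) (ys : List Int) (xs : List Int) :
    ∀ (dp : Int → Int → Int) (x y : Int),
      (xs.foldl (fun d i => ys.foldl (fun d2 j => updA d2 i j (v i j)) d) dp) x y
        = if x ∈ xs ∧ y ∈ ys then v x y else dp x y := by
  induction xs with
  | nil => intro dp x y; simp
  | cons a xs ih =>
    intro dp x y
    simp only [List.foldl_cons]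
    rw [ih, foldl_upd_row (v a) a ys]
    simp only [List.mem_cons]
    split_ifs <;> first | rfl | tauto

def initA (n : Int) : Int → Int → Int :=
  (PySem.List.pyRange 0 n 1).foldl (fun f i => updA f i i 1) (fun _ _ => 0)

def stepA (n : Int) (table : List (List String))
    (st : (Int → Int → Int) × (Int → Int → Int)) (k : Int) :
    (Int → Int → Int) × (Int → Int → Int) :=
  let m : Int := 1000000007
  let old := if PySem.Int.band k 1 = 1 then st.1 else st.2
  let dp0 := if PySem.Int.band k 1 = 1 then st.2 else st.1
  let dp := (PySem.List.pyRange 0 (n - k) 1).foldl (fun dp i =>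
    (PySem.List.pyRange 0 (n - k) 1).foldl (fun dp j =>
      if tget table (n - k - i - 1) i = tget table (n - j - 1) (j + k) then
        updA dp i j (PySem.Int.mod
          (PySem.Int.mod (old i j + old (i + 1) j) m +
           PySem.Int.mod (old i (j + 1) + old (i + 1) (j + 1)) m) m)
      else updA dp i j 0) dp) dp0
  if PySem.Int.band k 1 = 1 then (st.1, dp) else (dp, st.2)

lemma solve_eq (n : Int) (table : List (List String)) :
    solve n table =
      (if PySem.Int.band n 1 = 1
        then ((PySem.List.pyRange 1 n 1).foldl (stepA n table) (initA n, fun _ _ => 0)).1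
        else ((PySem.List.pyRange 1 n 1).foldl (stepA n table) (initA n, fun _ _ => 0)).2) 0 0 := rfl

def SA (n : Int) (table : List (List String)) (K : Nat) :
    (Int → Int → Int) × (Int → Int → Int) :=
  (PySem.List.pyRange 1 (1 + (K : Int)) 1).foldl (stepA n table) (initA n, fun _ _ => 0)

def layerAt (K : Nat) (st : (Int → Int → Int) × (Int → Int → Int)) : Int → Int → Int :=
  if K % 2 = 1 then st.2 else st.1

lemma mod_merge (a b c d : Int) :
    PySem.Int.mod (PySem.Int.mod (a + b) 1000000007 + PySem.Int.mod (c + d) 1000000007) 1000000007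
      = PySem.Int.mod (a + b + c + d) 1000000007 := by
  rw [PySem.Int.mod_eq_emod_of_pos (by norm_num), PySem.Int.mod_eq_emod_of_pos (by norm_num),
      PySem.Int.mod_eq_emod_of_pos (by norm_num), PySem.Int.mod_eq_emod_of_pos (by norm_num)]
  conv_rhs => rw [show a + b + c + d = (a + b) + (c + d) from by ring, Int.add_emod]

lemma invA (n : Int) (table : List (List String)) :
    ∀ (K : Nat), (K : Int) ≤ n - 1 →
      ∀ x y : Int, 0 ≤ x → x < n - (K : Int) → 0 ≤ y → y < n - (K : Int) →
        layerAt K (SA n table K) x y = W n table K x y := by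
  intro K
  induction K with
  | zero =>
    intro hK x y hx hxn hy hyn
    have hemp : PySem.List.pyRange 1 (1 + ((0 : Nat) : Int)) 1 = [] := by
      rw [PySem.List.pyRange_one]; norm_num
    simp only [SA, layerAt, hemp, List.foldl_nil, Nat.zero_mod]
    rw [if_neg (by omega)]
    simp only [initA]
    rw [foldl_diag]
    simp only [PySem.List.mem_pyRange_one, W]
    push_cast at hxn
    split_ifs <;> first | rfl | tauto | omega
  | succ K ih =>
    intro hK x y hx hxn hy hyn
    have hKn : (K : Int) ≤ n - 1 := by push_cast at hK ⊢; omega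
    have hcast : ((K + 1 : Nat) : Int) = (K : Int) + 1 := by push_cast; ring
    have hrange : PySem.List.pyRange 1 (1 + ((K + 1 : Nat) : Int)) 1
        = PySem.List.pyRange 1 (1 + (K : Int)) 1 ++ [1 + (K : Int)] := by
      rw [hcast, show 1 + ((K : Int) + 1) = (1 + (K : Int)) + 1 from by ring,
        PySem.List.pyRange_one_succ_right (by omega)]
    have hSA : SA n table (K + 1) = stepA n table (SA n table K) (1 + (K : Int)) := by
      simp only [SA, hrange, List.foldl_append, List.foldl_cons, List.foldl_nil]
    have hk1 : (1 : Int) + (K : Int) = (K : Int) + 1 := by ring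
    have hband : PySem.Int.band ((K : Int) + 1) 1 = ((K : Int) + 1) % 2 := by
      rw [PySem.Int.band_one, PySem.Int.mod_eq_emod_of_pos (by norm_num)]
    rw [hSA, hk1]
    push_cast at hxn hyn
    -- old layer = layerAt K (SA n table K), new layer = the grid fold, in both parities
    have key : ∀ (old dp0 : Int → Int → Int),
        old = layerAt K (SA n table K) →
        ((PySem.List.pyRange 0 (n - ((K : Int) + 1)) 1).foldl (fun dp i =>
          (PySem.List.pyRange 0 (n - ((K : Int) + 1)) 1).foldl (fun dp j =>
            if tget table (n - ((K : Int) + 1) - i - 1) i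
                = tget table (n - j - 1) (j + ((K : Int) + 1)) then
              updA dp i j (PySem.Int.mod
                (PySem.Int.mod (old i j + old (i + 1) j) 1000000007 +
                 PySem.Int.mod (old i (j + 1) + old (i + 1) (j + 1)) 1000000007) 1000000007)
            else updA dp i j 0) dp) dp0) x y = W n table (K + 1) x y := by
      intro old dp0 hold
      have hbody : (fun (dp : Int → Int → Int) (i : Int) =>
          (PySem.List.pyRange 0 (n - ((K : Int) + 1)) 1).foldl (fun dp j =>
            if tget table (n - ((K : Int) + 1) - i - 1) i
                = tget table (n - j - 1) (j + ((K : Int) + 1)) then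
              updA dp i j (PySem.Int.mod
                (PySem.Int.mod (old i j + old (i + 1) j) 1000000007 +
                 PySem.Int.mod (old i (j + 1) + old (i + 1) (j + 1)) 1000000007) 1000000007)
            else updA dp i j 0) dp)
        = (fun (dp : Int → Int → Int) (i : Int) =>
            (PySem.List.pyRange 0 (n - ((K : Int) + 1)) 1).foldl (fun d2 j =>
              updA d2 i j
                (if tget table (n - ((K : Int) + 1) - i - 1) i
                    = tget table (n - j - 1) (j + ((K : Int) + 1)) then
                  PySem.Int.mod
                    (PySem.Int.mod (old i j + old (i + 1) j) 1000000007 +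
                     PySem.Int.mod (old i (j + 1) + old (i + 1) (j + 1)) 1000000007) 1000000007
                 else 0)) dp) := by
        funext dp i
        congr 1
        funext d2 j
        split_ifs <;> rfl
      rw [hbody, foldl_upd_grid]
      rw [if_pos ⟨PySem.List.mem_pyRange_one.mpr ⟨hx, by omega⟩,
        PySem.List.mem_pyRange_one.mpr ⟨hy, by omega⟩⟩]
      have hxy : ∀ a b : Int, 0 ≤ a → a < n - (K : Int) → 0 ≤ b → b < n - (K : Int) →
          old a b = W n table K a b := by
        intro a b ha1 ha2 hb1 hb2
        rw [hold]
        exact ih hKn a b ha1 ha2 hb1 hb2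
      rw [W]
      by_cases hcond : tget table (n - ((K : Int) + 1) - x - 1) x
          = tget table (n - y - 1) (y + ((K : Int) + 1))
      · rw [if_pos hcond, if_pos hcond]
        rw [hxy x y hx (by omega) hy (by omega),
          hxy (x + 1) y (by omega) (by omega) hy (by omega),
          hxy x (y + 1) hx (by omega) (by omega) (by omega),
          hxy (x + 1) (y + 1) (by omega) (by omega) (by omega) (by omega)]
        exact mod_merge _ _ _ _
      · rw [if_neg hcond, if_neg hcond]
    by_cases hpe : K % 2 = 0
    · have hb : PySem.Int.band ((K : Int) + 1) 1 = 1 := by rw [hband]; omega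
      simp only [stepA, hb, layerAt, if_pos (show (K + 1) % 2 = 1 by omega), ite_true]
      exact key _ _ (by simp [layerAt, hpe])
    · have hb : ¬ PySem.Int.band ((K : Int) + 1) 1 = 1 := by rw [hband]; omega
      simp only [stepA, hb, ite_false, layerAt,
        if_neg (show ¬ (K + 1) % 2 = 1 by omega)]
      exact key _ _ (by
        have : K % 2 = 1 := by omega
        simp [layerAt, this])

lemma solve_eq_W (n : Int) (table : List (List String)) (hn : 0 < n) :
    solve n table = W n table (n - 1).toNat 0 0 := by
  set K := (n - 1).toNat with hKdef
  have hKn : (K : Int) = n - 1 := by omega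
  have h1 : PySem.List.pyRange 1 n 1 = PySem.List.pyRange 1 (1 + (K : Int)) 1 := by
    rw [show 1 + (K : Int) = n from by omega]
  rw [solve_eq, h1]
  have hinv := invA n table K (by omega) 0 0 le_rfl (by omega) le_rfl (by omega)
  have hband : PySem.Int.band n 1 = n % 2 := by
    rw [PySem.Int.band_one, PySem.Int.mod_eq_emod_of_pos (by norm_num)]
  by_cases hpe : n % 2 = 1
  · rw [if_pos (by rw [hband]; exact hpe)]
    rw [layerAt, if_neg (by omega)] at hinv
    exact hinv
  · rw [if_neg (by rw [hband]; exact hpe)]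
    rw [layerAt, if_pos (by omega)] at hinv
    exact hinv

-- ===== VERDICT (by name: the statement is the Claim_ definition above) =====
theorem solve_spec : Claim_equal_solve := by
  intro n table _ _
  unfold Spec_solve
  by_cases hn : 0 < n
  · rw [solve_eq_W n table hn, solve_alt_eq_W n table hn]
  · have hn' : n ≤ 0 := by omega
    have hr0 : PySem.List.pyRange 0 n 1 = [] := by
      rw [PySem.List.pyRange_one, show (n - 0).toNat = 0 from by omega]; simp
    have hr1 : PySem.List.pyRange 1 n 1 = [] := by
      rw [PySem.List.pyRange_one, show (n - 1).toNat = 0 from by omega]; simp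
    rw [solve_eq]
    simp only [hr1, List.foldl_nil, initA, hr0, solve_alt, if_pos hn']
    split_ifs <;> rfl
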